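-- pv_equiv track=rewrite | github.com/Zach-etier/ProveIT_2025_Flow_Workshop | shared/scripts/render_report_html.py | _content_after_tables
-- ===== SOURCE A (Python) =====
-- def _content_after_tables(content: str) -> str:
--     """Get content that follows tables (notes, bullet points, etc.)."""
--     lines = content.split('\n')
--     # Find last table end
--     last_table_end = 0
--     i = 0
--     while i < len(lines):
--         if lines[i].strip().startswith('|'):
--             while i < len(lines) and lines[i].strip().startswith('|'):
--                 i += 1
--             last_table_end = i
--         else:
--             i += 1
--     remaining = '\n'.join(lines[last_table_end:]).strip()
--     return remaining
-- ===== SOURCE B (Python) =====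
-- def _content_after_tables(content: str) -> str:
--     """Get content that follows tables (notes, bullet points, etc.)."""
--     lines = content.split('\n')
--     cut = 0
--     for idx in range(len(lines) - 1, -1, -1):
--         if lines[idx].strip().startswith('|'):
--             cut = idx + 1
--             break
--     return '\n'.join(lines[cut:]).strip()
-- ===== Notes on version B (the rewrite author's own statement) =====
-- stated objective: simpler
-- what changed: Replaced A's forward scan with a nested block-consuming while loop by a single backward search for the last line whose stripped text starts with '|' (cut = that index + 1, else 0), then the same join-and-strip.
import Mathlib
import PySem

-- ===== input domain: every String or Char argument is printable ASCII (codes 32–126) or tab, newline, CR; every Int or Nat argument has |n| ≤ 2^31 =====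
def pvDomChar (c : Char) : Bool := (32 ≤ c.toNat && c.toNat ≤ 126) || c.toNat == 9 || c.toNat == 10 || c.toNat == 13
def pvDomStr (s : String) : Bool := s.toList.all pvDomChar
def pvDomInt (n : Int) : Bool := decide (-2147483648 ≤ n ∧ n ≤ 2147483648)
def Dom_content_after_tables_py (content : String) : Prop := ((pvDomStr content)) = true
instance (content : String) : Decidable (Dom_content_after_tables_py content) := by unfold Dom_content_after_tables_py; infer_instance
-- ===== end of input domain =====

-- B replaces A's nested forward block-consuming scan by one backward search for the
-- last '|'-starting line; objective: simpler (same asymptotic cost).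

-- lines[i].strip().startswith('|')
def pvBar (s : String) : Bool := PySem.Str.startswith (PySem.Str.strip s) "|"

-- ===== PORT A =====
-- inner 'while i < len(lines) and lines[i].strip().startswith("|"): i += 1'
def aInner (lines : List String) (i : Nat) : Nat :=
  if i < lines.length && pvBar (lines.getD i "") then aInner lines (i + 1) else i
termination_by lines.length - i
decreasing_by
  rename_i h
  simp only [Bool.and_eq_true, decide_eq_true_eq] at h
  omega

theorem aInner_ge (lines : List String) (i : Nat) : i ≤ aInner lines i := by
  induction i using aInner.induct lines with
  | case1 i h ih => rw [aInner, if_pos h]; omega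
  | case2 i h => rw [aInner, if_neg h]

-- outer while loop: state (i, last_table_end)
def aOuter (lines : List String) (i last : Nat) : Nat :=
  if h : i < lines.length then
    if hb : pvBar (lines.getD i "") then
      aOuter lines (aInner lines i) (aInner lines i)
    else
      aOuter lines (i + 1) last
  else last
termination_by lines.length - i
decreasing_by
  · have h1 : aInner lines i = aInner lines (i + 1) := by
      rw [aInner, if_pos (by simp only [Bool.and_eq_true, decide_eq_true_eq]; exact ⟨h, hb⟩)]
    have := aInner_ge lines (i + 1)
    omega
  · omega

-- lines = content.split('\n') (shared by both ports)
def pyLines (content : String) : List String :=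
  (PySem.Chars.splitOn content.toList ['\n']).map String.ofList

def content_after_tables_py (content : String) : String :=
  PySem.Str.strip (PySem.Str.join "\n" ((pyLines content).drop (aOuter (pyLines content) 0 0)))

-- ===== PORT B =====
-- 'for idx in range(len(lines)-1, -1, -1): if bar: cut = idx+1; break' — backward search
def bFind (lines : List String) : Nat → Nat
  | 0 => 0
  | n + 1 => if pvBar (lines.getD n "") then n + 1 else bFind lines n

def content_after_tables_py_alt (content : String) : String :=
  PySem.Str.strip (PySem.Str.join "\n" ((pyLines content).drop (bFind (pyLines content) (pyLines content).length)))

-- ===== PRECONDITION & SPEC =====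
def Spec_content_after_tables_py (content : String) (out : String) : Prop := out = content_after_tables_py_alt content
instance (content : String) (out : String) : Decidable (Spec_content_after_tables_py content out) := by unfold Spec_content_after_tables_py; infer_instance

-- ===== CLAIM (what is proved, stated in full; the proofs are below) =====
def Claim_equal_content_after_tables_py : Prop := ∀ (content : String), Dom_content_after_tables_py content → Spec_content_after_tables_py content (content_after_tables_py content)

-- ===== LEMMAS AND PROOFS =====

-- the inner while stops just past a bar line, within bounds
theorem aInner_spec (lines : List String) (i : Nat) (h : i < lines.length)
    (hb : pvBar (lines.getD i "") = true) :
    aInner lines i ≤ lines.length ∧ pvBar (lines.getD (aInner lines i - 1) "") = true := by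
  induction i using aInner.induct lines with
  | case1 i hc ih =>
    simp only [Bool.and_eq_true, decide_eq_true_eq] at hc
    rw [aInner, if_pos (by simp only [Bool.and_eq_true, decide_eq_true_eq]; exact ⟨hc.1, hc.2⟩)]
    by_cases h2 : (i + 1) < lines.length ∧ pvBar (lines.getD (i + 1) "") = true
    · exact ih h2.1 h2.2
    · have : aInner lines (i + 1) = i + 1 := by
        rw [aInner, if_neg (by simp only [Bool.and_eq_true, decide_eq_true_eq]; tauto)]
      rw [this]; exact ⟨hc.1, by simpa using hc.2⟩
  | case2 i hc =>
    simp only [Bool.and_eq_true, decide_eq_true_eq, not_and] at hc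
    exact absurd hb (by simpa using hc h)

theorem bFind_at_bar (lines : List String) (j : Nat) (hj : 1 ≤ j)
    (hb : pvBar (lines.getD (j - 1) "") = true) : bFind lines j = j := by
  obtain ⟨m, rfl⟩ : ∃ m, j = m + 1 := ⟨j - 1, by omega⟩
  simp only [Nat.add_sub_cancel] at hb
  rw [bFind, if_pos hb]

-- main invariant: A's outer loop, started at i with last = bFind lines i, ends at B's cut
theorem aOuter_eq_bFind (lines : List String) :
    ∀ k i last, lines.length - i ≤ k → i ≤ lines.length → last = bFind lines i →
      aOuter lines i last = bFind lines lines.length := by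
  intro k
  induction k with
  | zero =>
    intro i last hk hi hlast
    have : i = lines.length := by omega
    subst this
    rw [aOuter, dif_neg (by omega), hlast]
  | succ k ih =>
    intro i last hk hi hlast
    by_cases h : i < lines.length
    · rw [aOuter, dif_pos h]
      by_cases hb : pvBar (lines.getD i "") = true
      · rw [dif_pos hb]
        obtain ⟨hle, hbar⟩ := aInner_spec lines i h hb
        have hgt : i < aInner lines i := by
          have h1 : aInner lines i = aInner lines (i + 1) := by
            rw [aInner, if_pos (by simp only [Bool.and_eq_true, decide_eq_true_eq]; exact ⟨h, hb⟩)]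
          have := aInner_ge lines (i + 1)
          omega
        exact ih _ _ (by omega) hle (bFind_at_bar lines _ (by omega) hbar).symm
      · rw [dif_neg hb]
        refine ih _ _ (by omega) (by omega) ?_
        rw [bFind, if_neg hb, ← hlast]
    · have : i = lines.length := by omega
      subst this
      rw [aOuter, dif_neg (by omega), hlast]

-- ===== VERDICT (by name: the statement is the Claim_ definition above) =====
theorem content_after_tables_py_spec : Claim_equal_content_after_tables_py := by
  intro content _
  unfold Spec_content_after_tables_py content_after_tables_py content_after_tables_py_alt
  rw [aOuter_eq_bFind (pyLines content) (pyLines content).length 0 0 le_rfl (Nat.zero_le _) rfl]
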